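-- pv_equiv track=rewrite | github.com/IazaKana/algorithm_2023 | Coding_test/inflearn_codingtest_python/section5/5n2.py | solution
-- ===== SOURCE A (Python) =====
-- def solution(nums):
--     answer = []
--     n = len(nums)
--     minN = 1000000000
--     nums.sort()
--     for i in range(1, n):
--         diff = nums[i] - nums[i-1]
--         minN = min(minN, diff)
--
--     for i in range(1, n):
--         diff = nums[i] - nums[i-1]
--         if diff == minN:
--             answer.append([nums[i-1], nums[i]])
--
--     return answer
-- ===== SOURCE B (Python) =====
-- def solution(nums):
--     nums.sort()
--     best = None
--     answer = []
--     for a, b in zip(nums, nums[1:]):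
--         d = b - a
--         if best is None or d < best:
--             best = d
--             answer = [[a, b]]
--         elif d == best:
--             answer.append([a, b])
--     return answer
-- ===== Notes on version B (the rewrite author's own statement) =====
-- stated objective: simpler
-- what changed: Replaces A's sentinel-initialized two-pass scheme (one pass to find the minimum adjacent difference, a second to collect the pairs) by a single pass over adjacent pairs of the sorted list that resets the answer list on a strict improvement and appends on a tie.
-- intended difference: On lists of length at least 2 whose elements are pairwise more than 10^9 apart, A's sentinel minN of 10^9 is never beaten so A returns the empty list, while B returns the pairs achieving the true minimum adjacent difference, which is the intended result of the function. — e.g. on solution([0, 2000000000]): A returns [], B returns [[0, 2000000000]]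
import Mathlib
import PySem

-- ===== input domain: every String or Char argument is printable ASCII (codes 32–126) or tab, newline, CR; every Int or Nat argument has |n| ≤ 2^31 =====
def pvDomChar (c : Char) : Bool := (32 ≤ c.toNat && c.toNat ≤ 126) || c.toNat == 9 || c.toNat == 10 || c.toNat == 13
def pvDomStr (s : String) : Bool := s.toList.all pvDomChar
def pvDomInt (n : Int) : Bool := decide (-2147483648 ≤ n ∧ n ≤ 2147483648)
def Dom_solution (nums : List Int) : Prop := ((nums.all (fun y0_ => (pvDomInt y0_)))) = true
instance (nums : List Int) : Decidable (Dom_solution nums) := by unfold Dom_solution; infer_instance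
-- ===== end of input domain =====

-- B fuses A's two passes into one reset-on-improvement pass over adjacent pairs of the
-- sorted list (objective: simpler).  Both A and B sort the argument list in place in
-- Python; the equivalence proved here is about the return value.

-- ===== PORT A =====
def solution (nums : List Int) : List (List Int) :=
  let n : Int := (nums.length : Int)
  let s := PySem.List.sorted nums (fun x => x) false
  let minN : Int := (PySem.List.pyRange 1 n 1).foldl
    (fun m i => min m (PySem.List.pyGetD s i 0 - PySem.List.pyGetD s (i - 1) 0)) 1000000000
  (PySem.List.pyRange 1 n 1).foldl
    (fun ans i =>
      if PySem.List.pyGetD s i 0 - PySem.List.pyGetD s (i - 1) 0 = minN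
      then ans ++ [[PySem.List.pyGetD s (i - 1) 0, PySem.List.pyGetD s i 0]]
      else ans) []

-- ===== PORT B =====
-- one loop step of Source B's single pass: reset on strict improvement, append on a tie
def bstep (st : Option Int × List (List Int)) (p : Int × Int) : Option Int × List (List Int) :=
  match st.1 with
  | none => (some (p.2 - p.1), [[p.1, p.2]])
  | some m =>
    if p.2 - p.1 < m then (some (p.2 - p.1), [[p.1, p.2]])
    else if p.2 - p.1 = m then (some m, st.2 ++ [[p.1, p.2]])
    else st

def solution_alt (nums : List Int) : List (List Int) :=
  let s := PySem.List.sorted nums (fun x => x) false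
  ((s.zip (s.drop 1)).foldl bstep (none, [])).2

-- ===== PRECONDITION & SPEC =====
-- On lists of length at least 2 whose elements are pairwise more than 10^9 apart, A's sentinel
-- minN of 10^9 is never beaten so A returns the empty list, while B returns the pairs
-- achieving the true minimum adjacent difference, which is the intended result of the function.
def D_solution (nums : List Int) : Prop :=
  2 ≤ nums.length ∧ nums.Pairwise (fun a b => 1000000000 < (a - b).natAbs)
instance (nums : List Int) : Decidable (D_solution nums) := by unfold D_solution; infer_instance

def Spec_solution (nums : List Int) (out : List (List Int)) : Prop :=
  ¬ D_solution nums → out = solution_alt nums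
instance (nums : List Int) (out : List (List Int)) : Decidable (Spec_solution nums out) := by
  unfold Spec_solution; infer_instance

def pvDiffWitness_solution : List Int := [0, 2000000000]
def pvDiffWitnessOut_solution : (List (List Int)) × (List (List Int)) :=
  ([], [[0, 2000000000]])

-- ===== CLAIM (what is proved, stated in full; the proofs are below) =====
def Claim_unchanged_solution : Prop :=
  ∀ (nums : List Int), Dom_solution nums → Spec_solution nums (solution nums)
def Claim_changed_solution : Prop :=
  Dom_solution (pvDiffWitness_solution) ∧ D_solution (pvDiffWitness_solution) ∧
  solution (pvDiffWitness_solution) = pvDiffWitnessOut_solution.1 ∧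
  solution_alt (pvDiffWitness_solution) = pvDiffWitnessOut_solution.2 ∧
  pvDiffWitnessOut_solution.1 ≠ pvDiffWitnessOut_solution.2
def Claim_exact_solution : Prop :=
  ∀ (nums : List Int), Dom_solution nums → D_solution nums →
    solution nums ≠ solution_alt nums

-- ===== LEMMAS AND PROOFS =====

-- the pairs of L whose difference is v, as two-element lists (proof-only helper)
def sel (L : List (Int × Int)) (v : Int) : List (List Int) :=
  (L.filter (fun p => decide (p.2 - p.1 = v))).map (fun p => [p.1, p.2])

lemma sel_cons (p : Int × Int) (t : List (Int × Int)) (v : Int) :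
    sel (p :: t) v = (if p.2 - p.1 = v then [[p.1, p.2]] else []) ++ sel t v := by
  by_cases h : p.2 - p.1 = v <;> simp [sel, h]

-- a foldl over indices 1..len-1 reading positions k and k+1 is a foldl over adjacent pairs
lemma range_fold_pairs {β : Type} (s : List Int) (g : β → Int → Int → β) (init : β) :
    (List.range (s.length - 1)).foldl
      (fun acc k => g acc (s.getD k 0) (s.getD (k + 1) 0)) init
    = (s.zip (s.drop 1)).foldl (fun acc p => g acc p.1 p.2) init := by
  induction s generalizing init with
  | nil => simp
  | cons a t ih =>
    cases t with
    | nil => simp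
    | cons b u =>
      have hr : List.range ((a :: b :: u).length - 1)
          = 0 :: (List.range ((b :: u).length - 1)).map Nat.succ := by
        simp [List.range_succ_eq_map]
      rw [hr]
      simp only [List.foldl_cons, List.foldl_map]
      simpa using ih (g init a b)

lemma index_fold_pairs {β : Type} (s : List Int) (g : β → Int → Int → β) (init : β) :
    (PySem.List.pyRange 1 (s.length : Int) 1).foldl
      (fun acc i => g acc (PySem.List.pyGetD s (i - 1) 0) (PySem.List.pyGetD s i 0)) init
    = (s.zip (s.drop 1)).foldl (fun acc p => g acc p.1 p.2) init := by
  rw [PySem.List.pyRange_one, List.foldl_map, ← range_fold_pairs s g init]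
  have hn : ((s.length : Int) - 1).toNat = s.length - 1 := by omega
  rw [hn]
  apply PySem.List.foldl_congr_mem
  intro acc k hk
  have hk' : k < s.length - 1 := by simpa using List.mem_range.mp hk
  have h1 : (1 : Int) + (k : Int) - 1 = ((k : Nat) : Int) := by ring
  have h2 : (1 : Int) + (k : Int) = (((k + 1 : Nat)) : Int) := by push_cast; ring
  rw [h1, h2, PySem.List.pyGetD_natCast, PySem.List.pyGetD_natCast]

lemma bfold_some (L : List (Int × Int)) (m : Int) (A0 : List (List Int)) :
    L.foldl bstep (some m, A0)
      = (some ((L.map (fun p => p.2 - p.1)).foldl min m),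
         if (L.map (fun p => p.2 - p.1)).foldl min m = m
         then A0 ++ sel L m
         else sel L ((L.map (fun p => p.2 - p.1)).foldl min m)) := by
  induction L generalizing m A0 with
  | nil => simp [sel]
  | cons p t ih =>
    have hle : ∀ (x : Int), (t.map (fun p => p.2 - p.1)).foldl min x ≤ x :=
      fun x => (PySem.List.foldl_min_le _ x).1
    simp only [List.foldl_cons, List.map_cons]
    by_cases h1 : p.2 - p.1 < m
    · have hb : bstep (some m, A0) p = (some (p.2 - p.1), [[p.1, p.2]]) := by
        simp [bstep, h1]
      rw [hb, ih]
      have hmin : min m (p.2 - p.1) = p.2 - p.1 := by omega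
      rw [hmin]
      set M := (t.map (fun p => p.2 - p.1)).foldl min (p.2 - p.1) with hM
      have hMle : M ≤ p.2 - p.1 := hle _
      have hne : M ≠ m := by omega
      rw [if_neg hne]
      by_cases h2 : M = p.2 - p.1
      · rw [if_pos h2, h2, sel_cons, if_pos rfl]
      · rw [if_neg h2, sel_cons, if_neg (by omega), List.nil_append]
    · by_cases h2 : p.2 - p.1 = m
      · have hb : bstep (some m, A0) p = (some m, A0 ++ [[p.1, p.2]]) := by
          simp [bstep, h2]
        rw [hb, ih]
        have hmin : min m (p.2 - p.1) = m := by omega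
        rw [hmin]
        set M := (t.map (fun p => p.2 - p.1)).foldl min m with hM
        by_cases h3 : M = m
        · rw [if_pos h3, if_pos h3, sel_cons, if_pos h2]
          simp
        · rw [if_neg h3, if_neg h3, sel_cons, if_neg (by have := hle m; omega), List.nil_append]
      · have hb : bstep (some m, A0) p = (some m, A0) := by
          simp [bstep, h1, h2]
        rw [hb, ih]
        have hmin : min m (p.2 - p.1) = m := by omega
        rw [hmin]
        set M := (t.map (fun p => p.2 - p.1)).foldl min m with hM
        have hMle : M ≤ m := hle m
        by_cases h3 : M = m
        · rw [if_pos h3, if_pos h3, sel_cons, if_neg (by omega), List.nil_append]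
        · rw [if_neg h3, if_neg h3, sel_cons, if_neg (by omega), List.nil_append]

lemma solution_norm (nums : List Int) :
    solution nums =
      sel ((PySem.List.sorted nums (fun x => x) false).zip ((PySem.List.sorted nums (fun x => x) false).drop 1))
          ((((PySem.List.sorted nums (fun x => x) false).zip ((PySem.List.sorted nums (fun x => x) false).drop 1)).map (fun p => p.2 - p.1)).foldl min 1000000000) := by
  simp only [solution]
  set s := PySem.List.sorted nums (fun x => x) false with hs
  have hlen : (nums.length : Int) = (s.length : Int) := by
    simp [hs, PySem.List.length_sorted]
  rw [hlen]
  rw [index_fold_pairs s (fun (acc : Int) a b => min acc (b - a)) 1000000000]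
  rw [List.foldl_map]
  set M0 : Int := (s.zip (s.drop 1)).foldl (fun acc p => min acc (p.2 - p.1)) 1000000000 with hM0
  rw [index_fold_pairs s (fun (acc : List (List Int)) a b => if b - a = M0 then acc ++ [[a, b]] else acc) []]
  rw [PySem.List.foldl_append_ite (p := fun q : Int × Int => q.2 - q.1 = M0) (f := fun q : Int × Int => [q.1, q.2])]
  simp [sel]

lemma bfold_cons (p0 : Int × Int) (t : List (Int × Int)) :
    ((p0 :: t).foldl bstep ((none : Option Int), ([] : List (List Int)))).2
      = sel (p0 :: t) ((t.map (fun p => p.2 - p.1)).foldl min (p0.2 - p0.1)) := by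
  simp only [List.foldl_cons]
  have h0 : bstep (none, []) p0 = (some (p0.2 - p0.1), [[p0.1, p0.2]]) := rfl
  rw [h0, bfold_some]
  set M := (t.map (fun p => p.2 - p.1)).foldl min (p0.2 - p0.1) with hM
  have hMle : M ≤ p0.2 - p0.1 := (PySem.List.foldl_min_le _ _).1
  by_cases h : M = p0.2 - p0.1
  · rw [if_pos h, h, sel_cons, if_pos rfl]
  · rw [if_neg h, sel_cons, if_neg (by omega), List.nil_append]

lemma gap_mem (s : List Int) (i : Nat) (h : i + 1 < s.length) :
    s[i+1] - s[i] ∈ ((s.zip (s.drop 1)).map (fun p => p.2 - p.1)) := by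
  have hl : i < (s.zip (s.drop 1)).length := by simp; omega
  have : (s.zip (s.drop 1))[i] = (s[i], s[i+1]) := by
    simp [List.getElem_zip]
  refine List.mem_map.mpr ⟨(s[i], s[i+1]), ?_, rfl⟩
  rw [← this]; exact List.getElem_mem hl

lemma min_le_all (p0 : Int) (t : List Int) (y : Int) (hy : y ∈ p0 :: t) :
    t.foldl min p0 ≤ y := by
  rcases List.mem_cons.mp hy with h | h
  · rw [h]; exact (PySem.List.foldl_min_le t p0).1
  · exact (PySem.List.foldl_min_le t p0).2 y h

lemma pairwise_of_gaps (s : List Int) (nums : List Int)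
    (hs : s = PySem.List.sorted nums (fun x => x) false)
    (hbig : ∀ y ∈ ((s.zip (s.drop 1)).map (fun p => p.2 - p.1)), 1000000000 < y) :
    nums.Pairwise (fun a b => 1000000000 < (a - b).natAbs) := by
  subst hs
  have hsp : (PySem.List.sorted nums (fun x => x) false).Pairwise (fun a b => 1000000000 < (a - b).natAbs) := by
    rw [List.pairwise_iff_getElem]
    intro i j hi hj hij
    have hmono := PySem.List.sorted_id_getElem_mono nums (p := i+1) (q := j) (by omega) hj
    have hgap := hbig _ (gap_mem _ i (by omega))
    omega
  exact hsp.perm (PySem.List.sorted_perm nums (fun x => x) false)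
    (fun {x y} h => by omega)

lemma gaps_of_pairwise (s : List Int) (nums : List Int)
    (hs : s = PySem.List.sorted nums (fun x => x) false)
    (hp : nums.Pairwise (fun a b => 1000000000 < (a - b).natAbs)) :
    ∀ y ∈ ((s.zip (s.drop 1)).map (fun p => p.2 - p.1)), 1000000000 < y := by
  have hsp : s.Pairwise (fun a b => 1000000000 < (a - b).natAbs) :=
    hp.perm (hs ▸ PySem.List.sorted_perm nums (fun x => x) false).symm
      (fun {x y} h => by omega)
  intro y hy
  rcases List.mem_map.mp hy with ⟨p, hpmem, hpd⟩
  rcases List.mem_iff_getElem.mp hpmem with ⟨i, hil, hie⟩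
  have hi1 : i + 1 < s.length := by simp at hil; omega
  have hpe : p = (s[i], s[i+1]) := by rw [← hie]; simp [List.getElem_zip]
  have hpair := (List.pairwise_iff_getElem.mp hsp) i (i+1) (by omega) hi1 (by omega)
  have hmono : s[i] ≤ s[i+1] := by
    subst hs
    exact PySem.List.sorted_id_getElem_mono nums (p := i) (q := i+1) (by omega) hi1
  subst hpd; rw [hpe]; simp only
  omega

lemma main (nums : List Int)
    (hD : ¬ (2 ≤ nums.length ∧ nums.Pairwise (fun a b => 1000000000 < (a - b).natAbs))) :
    solution nums = solution_alt nums := by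
  rw [solution_norm]
  simp only [solution_alt]
  set s := PySem.List.sorted nums (fun x => x) false with hs
  have hlen : s.length = nums.length := by rw [hs]; exact PySem.List.length_sorted nums _ _
  cases hL : s.zip (s.drop 1) with
  | nil => simp [sel]
  | cons p0 t =>
    rw [bfold_cons]
    have hassoc : (((p0 :: t).map (fun p => p.2 - p.1)).foldl min 1000000000)
        = min 1000000000 ((t.map (fun p => p.2 - p.1)).foldl min (p0.2 - p0.1)) := by
      simp only [List.map_cons, List.foldl_cons]
      exact List.foldl_assoc
    set M := (t.map (fun p => p.2 - p.1)).foldl min (p0.2 - p0.1) with hM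
    by_cases hM9 : M ≤ 1000000000
    · rw [hassoc, min_eq_right hM9]
    · exfalso; apply hD
      refine ⟨?_, ?_⟩
      · have hz : (s.zip (s.drop 1)).length = s.length - 1 := by simp
        rw [hL] at hz; simp at hz; omega
      · apply pairwise_of_gaps s nums hs
        intro y hy
        rw [hL] at hy
        simp only [List.map_cons] at hy
        have := min_le_all _ _ y hy
        omega

lemma tight (nums : List Int)
    (hD : 2 ≤ nums.length ∧ nums.Pairwise (fun a b => 1000000000 < (a - b).natAbs)) :
    solution nums ≠ solution_alt nums := by
  rw [solution_norm]
  simp only [solution_alt]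
  set s := PySem.List.sorted nums (fun x => x) false with hs
  have hlen : s.length = nums.length := by rw [hs]; exact PySem.List.length_sorted nums _ _
  cases hL : s.zip (s.drop 1) with
  | nil =>
    exfalso
    have hz : (s.zip (s.drop 1)).length = s.length - 1 := by simp
    rw [hL] at hz; simp at hz; omega
  | cons p0 t =>
    rw [bfold_cons]
    have hbig := gaps_of_pairwise s nums hs hD.2
    rw [hL] at hbig
    simp only [List.map_cons] at hbig
    set M := (t.map (fun p => p.2 - p.1)).foldl min (p0.2 - p0.1) with hM
    have hMbig : 1000000000 < M := by
      rcases PySem.List.foldl_min_mem (t.map (fun p => p.2 - p.1)) (p0.2 - p0.1) with h | h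
      · rw [hM, h]; exact hbig _ (List.mem_cons_self)
      · exact hbig _ (List.mem_cons_of_mem _ h)
    have hassoc : (((p0 :: t).map (fun p => p.2 - p.1)).foldl min 1000000000)
        = min 1000000000 M := by
      simp only [List.map_cons, List.foldl_cons]
      exact List.foldl_assoc
    rw [hassoc, min_eq_left (le_of_lt hMbig)]
    have hAnil : sel (p0 :: t) 1000000000 = [] := by
      have : ∀ p ∈ p0 :: t, ¬ (p.2 - p.1 = 1000000000) := by
        intro p hp he
        rcases List.mem_cons.mp hp with h | h
        · have := hbig (p.2 - p.1) (by rw [h]; exact List.mem_cons_self)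
          omega
        · have := hbig (p.2 - p.1) (List.mem_cons_of_mem _ (List.mem_map_of_mem h))
          omega
      simp only [sel, List.map_eq_nil_iff, List.filter_eq_nil_iff]
      intro p hp; simpa using this p hp
    have hMmem : ∃ p ∈ p0 :: t, p.2 - p.1 = M := by
      rcases PySem.List.foldl_min_mem (t.map (fun p => p.2 - p.1)) (p0.2 - p0.1) with h | h
      · exact ⟨p0, List.mem_cons_self, by rw [hM, h]⟩
      · rcases List.mem_map.mp h with ⟨p, hp, he⟩
        exact ⟨p, List.mem_cons_of_mem _ hp, by rw [hM, he]⟩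
    have hBne : sel (p0 :: t) M ≠ [] := by
      rcases hMmem with ⟨p, hp, he⟩
      have hmem : [p.1, p.2] ∈ sel (p0 :: t) M := by
        simp only [sel]
        exact List.mem_map_of_mem (List.mem_filter.mpr ⟨hp, by simp [he]⟩)
      exact List.ne_nil_of_mem hmem
    rw [hAnil]
    exact fun h => hBne h.symm

-- ===== VERDICT (by name: the statement is the Claim_ definition above) =====
theorem solution_spec : Claim_unchanged_solution := by
  intro nums _ hD
  unfold D_solution at hD
  exact main nums hD

theorem solution_changed : Claim_changed_solution := by
  unfold Claim_changed_solution; decide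

theorem solution_tight : Claim_exact_solution := by
  intro nums _ hD
  unfold D_solution at hD
  exact tight nums hD
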